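-- pv_equiv track=rewrite | github.com/static-frame/frame-fixtures | frame_fixtures/core.py | iter_shift
-- ===== SOURCE A (Python) =====
-- import typing as tp
--
-- T = tp.TypeVar('T')
--
-- def iter_shift(iter: tp.Iterable[T],
--         count: int,
--         wrap: bool = False,
--         ) -> tp.Iterable[T]:
--     '''
--     If an array grows, wrapping will produce an order-dependent result.
--     '''
--     if wrap:
--         store = []
--     for i, v in enumerate(iter):
--         if i < count:
--             if wrap:
--                 store.append(v)
--             continue
--         yield v
--     if wrap:
--         yield from store
-- ===== SOURCE B (Python) =====
-- def iter_shift(iter, count, wrap=False):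
--     data = list(iter)
--     c = max(count, 0)
--     yield from data[c:]
--     if wrap:
--         yield from data[:c]
-- ===== Notes on version B (the rewrite author's own statement) =====
-- stated objective: simpler
-- what changed: B materializes the iterable into a list once and emits the two halves by slicing (data[c:] then, if wrap, data[:c]) instead of a per-item index comparison with a running store list.
import Mathlib
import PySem

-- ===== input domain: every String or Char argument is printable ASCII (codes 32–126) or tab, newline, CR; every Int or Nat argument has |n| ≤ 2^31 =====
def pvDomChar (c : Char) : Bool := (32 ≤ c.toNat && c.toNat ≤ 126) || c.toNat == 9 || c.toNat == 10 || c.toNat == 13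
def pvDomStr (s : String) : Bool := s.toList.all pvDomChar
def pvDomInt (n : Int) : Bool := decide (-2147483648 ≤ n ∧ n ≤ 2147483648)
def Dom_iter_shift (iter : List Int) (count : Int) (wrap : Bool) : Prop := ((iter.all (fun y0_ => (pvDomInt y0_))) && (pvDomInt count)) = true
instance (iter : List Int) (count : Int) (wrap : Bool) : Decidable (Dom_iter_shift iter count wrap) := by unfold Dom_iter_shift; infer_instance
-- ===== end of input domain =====

-- B replaces A's per-item index comparison with a running store by one slice split
-- (data[c:] ++ data[:c] when wrapping); objective: simpler. Return-value equivalence only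
-- (both Pythons are generators; the yielded sequence is compared).


-- ===== PORT A =====
-- A: one pass over enumerate(iter); indices < count are skipped (stored when wrap),
-- the rest yielded, then the store is flushed. State = (yielded so far, store).
def iter_shift (iter : List Int) (count : Int) (wrap : Bool) : List Int :=
  let st := (PySem.List.enumerate iter).foldl
    (fun (s : List Int × List Int) iv =>
      if iv.1 < count then (if wrap then (s.1, s.2 ++ [iv.2]) else s)
      else (s.1 ++ [iv.2], s.2))
    ([], [])
  st.1 ++ (if wrap then st.2 else [])

-- ===== PORT B =====
-- B: materialize, clamp the count, split by slicing: data[c:] then, if wrap, data[:c].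
def iter_shift_alt (iter : List Int) (count : Int) (wrap : Bool) : List Int :=
  let c : Int := max count 0
  PySem.List.slice iter (some c) none ++
    (if wrap then PySem.List.slice iter none (some c) else [])

-- ===== PRECONDITION & SPEC =====
def Spec_iter_shift (iter : List Int) (count : Int) (wrap : Bool) (out : List Int) : Prop := out = iter_shift_alt iter count wrap
instance (iter : List Int) (count : Int) (wrap : Bool) (out : List Int) : Decidable (Spec_iter_shift iter count wrap out) := by unfold Spec_iter_shift; infer_instance

-- ===== CLAIM (what is proved, stated in full; the proofs are below) =====
def Claim_equal_iter_shift : Prop := ∀ (iter : List Int) (count : Int) (wrap : Bool), Dom_iter_shift iter count wrap → Spec_iter_shift iter count wrap (iter_shift iter count wrap)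

-- ===== LEMMAS AND PROOFS =====

theorem foldl_enumerate_shift (count : Int) (wrap : Bool) :
    ∀ (xs : List Int) (s : Int) (o st : List Int),
    (PySem.List.enumerate xs s).foldl
      (fun (acc : List Int × List Int) iv =>
        if iv.1 < count then (if wrap then (acc.1, acc.2 ++ [iv.2]) else acc)
        else (acc.1 ++ [iv.2], acc.2)) (o, st)
    = (o ++ xs.drop (count - s).toNat,
       st ++ (if wrap then xs.take (count - s).toNat else [])) := by
  intro xs
  induction xs with
  | nil => intro s o st; simp [PySem.List.enumerate_nil]
  | cons x xs ih =>
    intro s o st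
    rw [PySem.List.enumerate_cons, List.foldl_cons]
    by_cases h : s < count
    · have hn : (count - s).toNat = (count - (s + 1)).toNat + 1 := by omega
      cases wrap <;> simp at ih ⊢ <;> simp [h, hn, ih]
    · have hn : (count - s).toNat = 0 := by omega
      have hn' : (count - (s + 1)).toNat = 0 := by omega
      simp at ih
      simp [h, hn, hn', ih]

-- ===== VERDICT (by name: the statement is the Claim_ definition above) =====
theorem iter_shift_spec : Claim_equal_iter_shift := by
  intro iter count wrap _
  unfold Spec_iter_shift iter_shift iter_shift_alt
  rw [foldl_enumerate_shift]
  have hc : (0 : Int) ≤ max count 0 := le_max_right _ _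
  simp only [PySem.List.slice_from _ hc, PySem.List.slice_to _ hc]
  have h1 : (max count 0).toNat = (count - 0).toNat := by omega
  cases wrap <;> simp [h1]
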